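-- pv_equiv track=rewrite | github.com/malik-ali/generative-grading | scripts/process_student_data.py | tokenize_code
-- ===== SOURCE A (Python) =====
-- def tokenize_code(code_str):
--     ret = []
--     word = ""
--     for ch in code_str:
--         if word and (ch.isspace() or not ch.isalnum()):
--             ret.append(word)
--             word = ""
--         if ch.isspace():
--             continue
--         elif not ch.isalnum():
--             ret.append(ch)
--         else:
--             word += ch
--     return ret
-- ===== SOURCE B (Python) =====
-- def tokenize_code(code_str):
--     # Delimiter-driven tokenizer: first collect the positions of all
--     # delimiter (non-alphanumeric) characters, then walk them, slicing
--     # out the word between consecutive delimiters and emitting each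
--     # non-whitespace delimiter as a token of its own.
--     delims = [(i, ch) for i, ch in enumerate(code_str) if not ch.isalnum()]
--     ret = []
--     prev = 0
--     for i, ch in delims:
--         if prev < i:
--             ret.append(code_str[prev:i])
--         if not ch.isspace():
--             ret.append(ch)
--         prev = i + 1
--     return ret
-- ===== Notes on version B (the rewrite author's own statement) =====
-- stated objective: alternative
-- what changed: Replaced A's per-character flush-on-delimiter state machine (a pending-word string accumulator mutated on every character) with a two-phase delimiter-driven pass: first collect the (index, char) pairs of all non-alphanumeric characters, then walk them, slicing the word between consecutive delimiters out of the input and emitting each non-whitespace delimiter as its own token.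
import Mathlib
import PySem

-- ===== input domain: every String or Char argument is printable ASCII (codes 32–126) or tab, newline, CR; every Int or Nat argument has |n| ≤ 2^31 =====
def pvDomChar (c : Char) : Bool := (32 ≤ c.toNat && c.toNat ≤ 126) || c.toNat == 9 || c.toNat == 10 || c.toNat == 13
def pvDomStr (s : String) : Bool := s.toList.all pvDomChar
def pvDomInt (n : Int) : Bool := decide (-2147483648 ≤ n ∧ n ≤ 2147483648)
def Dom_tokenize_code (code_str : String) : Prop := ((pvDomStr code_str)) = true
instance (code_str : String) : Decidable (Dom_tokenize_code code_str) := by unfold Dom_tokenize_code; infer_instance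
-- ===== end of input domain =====

-- B replaces A's per-character flush-on-delimiter state machine by a two-phase
-- delimiter-driven pass (collect delimiter positions, then slice out the words
-- between consecutive delimiters): an alternative O(n) decomposition, equal on all inputs.


-- ===== PORT A =====
-- one loop iteration of A: state is (ret, word), word kept as List Char
def tcStep (st : List String × List Char) (ch : Char) : List String × List Char :=
  let st :=
    if !st.2.isEmpty && (PySem.Chars.isspace ch || !PySem.Chars.isalnum ch) then
      (st.1 ++ [String.ofList st.2], ([] : List Char))
    else st
  if PySem.Chars.isspace ch then st
  else if !PySem.Chars.isalnum ch then (st.1 ++ [String.ofList [ch]], st.2)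
  else (st.1, st.2 ++ [ch])

def tokenize_code (code_str : String) : List String :=
  (code_str.toList.foldl tcStep ([], [])).1

-- ===== PORT B =====
-- phase 1 of B: the (index, char) pairs of the delimiter characters
def tcDelims (l : List Char) : List (Char × Nat) :=
  l.zipIdx.filter (fun p => !PySem.Chars.isalnum p.1)

-- one iteration of B's loop: state is (ret, prev); the slice code_str[prev:i]
-- is ported as (l.take i).drop prev, exact here since 0 ≤ prev ≤ i ≤ len
def tcEmit (l : List Char) (st : List String × Nat) (p : Char × Nat) : List String × Nat :=
  let ret := if st.2 < p.2 then st.1 ++ [String.ofList ((l.take p.2).drop st.2)] else st.1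
  let ret := if !PySem.Chars.isspace p.1 then ret ++ [String.ofList [p.1]] else ret
  (ret, p.2 + 1)

def tokenize_code_alt (code_str : String) : List String :=
  ((tcDelims code_str.toList).foldl (tcEmit code_str.toList) ([], 0)).1

-- ===== PRECONDITION & SPEC =====
def Spec_tokenize_code (code_str : String) (out : List String) : Prop := out = tokenize_code_alt code_str
instance (code_str : String) (out : List String) : Decidable (Spec_tokenize_code code_str out) := by unfold Spec_tokenize_code; infer_instance

-- ===== CLAIM (what is proved, stated in full; the proofs are below) =====
def Claim_equal_tokenize_code : Prop := ∀ (code_str : String), Dom_tokenize_code code_str → Spec_tokenize_code code_str (tokenize_code code_str)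

-- ===== LEMMAS AND PROOFS =====

-- common recursive reference semantics both ports are reduced to
def tcSpec (acc : List String) (pend : List Char) : List Char → List String
  | [] => acc
  | c :: cs =>
    if PySem.Chars.isalnum c then tcSpec acc (pend ++ [c]) cs
    else tcSpec ((if pend = [] then acc else acc ++ [String.ofList pend]) ++
                 (if PySem.Chars.isspace c then [] else [String.ofList [c]])) [] cs

-- no Python character is both a space and alphanumeric
lemma space_not_alnum (c : Char) (h : PySem.Chars.isspace c = true) :
    PySem.Chars.isalnum c = false := by
  have hA : ('A').val.toNat = 65 := rfl
  have hZ : ('Z').val.toNat = 90 := rfl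
  have ha : ('a').val.toNat = 97 := rfl
  have hz : ('z').val.toNat = 122 := rfl
  have h0 : ('0').val.toNat = 48 := rfl
  have h9 : ('9').val.toNat = 57 := rfl
  simp only [PySem.Chars.isspace, PySem.Chars.isalnum, PySem.Chars.isalpha, PySem.Chars.isdigit,
    PySem.Chars.isupper, PySem.Chars.islower, Char.le_def, UInt32.le_iff_toNat_le, Char.toNat,
    hA, hZ, ha, hz, h0, h9,
    Bool.or_eq_true, Bool.and_eq_true, decide_eq_true_eq, Bool.or_eq_false_iff,
    Bool.and_eq_false_iff, decide_eq_false_iff_not, not_le] at *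
  omega

-- A's fold computes the reference semantics
lemma foldA_eq (l : List Char) : ∀ (acc : List String) (pend : List Char),
    (l.foldl tcStep (acc, pend)).1 = tcSpec acc pend l := by
  induction l with
  | nil => intro acc pend; simp [tcSpec]
  | cons c cs ih =>
    intro acc pend
    by_cases hal : PySem.Chars.isalnum c = true
    · have hsp : PySem.Chars.isspace c = false := by
        by_contra h
        have := space_not_alnum c (by simpa using h)
        simp_all
      have hstep : tcStep (acc, pend) c = (acc, pend ++ [c]) := by
        simp [tcStep, hal, hsp]
      simp [List.foldl_cons, hstep, ih, tcSpec, hal]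
    · have hal' : PySem.Chars.isalnum c = false := by simp_all
      by_cases hsp : PySem.Chars.isspace c = true
      · have hstep : tcStep (acc, pend) c =
            ((if pend = [] then acc else acc ++ [String.ofList pend]), ([] : List Char)) := by
          by_cases hp : pend = [] <;> simp [tcStep, hal', hsp, hp]
        simp [List.foldl_cons, hstep, ih, tcSpec, hal', hsp]
      · have hsp' : PySem.Chars.isspace c = false := by simp_all
        have hstep : tcStep (acc, pend) c =
            ((if pend = [] then acc else acc ++ [String.ofList pend]) ++ [String.ofList [c]],
              ([] : List Char)) := by
          by_cases hp : pend = [] <;> simp [tcStep, hal', hsp', hp]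
        simp [List.foldl_cons, hstep, ih, tcSpec, hal', hsp']

-- B's fold over the delimiters of the suffix starting at j, with pending
-- segment code_str[prev:j], computes the reference semantics of the suffix
lemma foldB_eq (full : List Char) : ∀ (suffix : List Char) (j : Nat) (acc : List String) (prev : Nat),
    full.drop j = suffix → prev ≤ j →
    (((suffix.zipIdx j).filter (fun p => !PySem.Chars.isalnum p.1)).foldl (tcEmit full) (acc, prev)).1
      = tcSpec acc ((full.take j).drop prev) suffix := by
  intro suffix
  induction suffix with
  | nil => intro j acc prev hdrop hle; simp [tcSpec]
  | cons c cs ih =>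
    intro j acc prev hdrop hle
    have hj : j < full.length := by
      by_contra h
      have : full.drop j = [] := List.drop_eq_nil_of_le (by omega)
      simp_all
    have hget : full[j]? = some c := by
      have := congrArg List.head? hdrop
      simpa [List.head?_drop] using this
    have htake : full.take (j + 1) = full.take j ++ [c] := by
      simp [List.take_add_one, hget]
    have hdrop' : full.drop (j + 1) = cs := by
      have : full.drop (j+1) = (full.drop j).drop 1 := by
        rw [List.drop_drop]
      simpa [hdrop] using this
    have hlen : ((full.take j).drop prev).length = j - prev := by
      simp [List.length_drop, List.length_take]
      omega
    have hpend1 : (full.take (j+1)).drop prev = ((full.take j).drop prev) ++ [c] := by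
      rw [htake, List.drop_append_of_le_length]
      simp [List.length_take]; omega
    rw [List.zipIdx_cons]
    by_cases hal : PySem.Chars.isalnum c = true
    · -- alphanumeric: not a delimiter, the pending slice grows
      have hfil : List.filter (fun p => !PySem.Chars.isalnum p.1) ((c, j) :: cs.zipIdx (j+1))
          = List.filter (fun p => !PySem.Chars.isalnum p.1) (cs.zipIdx (j+1)) := by
        simp [hal]
      have := ih (j+1) acc prev hdrop' (by omega)
      rw [hfil, this, hpend1]
      simp [tcSpec, hal]
    · have hal' : PySem.Chars.isalnum c = false := by simp_all
      have hpend2 : (full.take (j+1)).drop (j+1) = [] :=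
        List.drop_eq_nil_of_le (by simp [List.length_take])
      have hemit : tcEmit full (acc, prev) (c, j) =
          ((if (full.take j).drop prev = [] then acc else acc ++ [String.ofList ((full.take j).drop prev)]) ++
           (if PySem.Chars.isspace c then [] else [String.ofList [c]]), j + 1) := by
        by_cases hlt : prev < j
        · have hne : (full.take j).drop prev ≠ [] := by
            intro h; rw [h] at hlen; simp at hlen; omega
          by_cases hsp : PySem.Chars.isspace c = true <;>
            simp [tcEmit, hlt, hne, hsp]
        · have heq : (full.take j).drop prev = [] := by
            have : ((full.take j).drop prev).length = 0 := by omega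
            exact List.eq_nil_of_length_eq_zero this
          by_cases hsp : PySem.Chars.isspace c = true <;>
            simp [tcEmit, hlt, heq, hsp]
      have := ih (j+1)
        ((if (full.take j).drop prev = [] then acc else acc ++ [String.ofList ((full.take j).drop prev)]) ++
         (if PySem.Chars.isspace c then [] else [String.ofList [c]]))
        (j+1) hdrop' (by omega)
      have hfil : List.filter (fun p => !PySem.Chars.isalnum p.1) ((c, j) :: cs.zipIdx (j+1))
          = (c, j) :: List.filter (fun p => !PySem.Chars.isalnum p.1) (cs.zipIdx (j+1)) := by
        simp [hal']
      rw [hfil, List.foldl_cons, hemit, this, hpend2]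
      simp [tcSpec, hal']

-- ===== VERDICT (by name: the statement is the Claim_ definition above) =====
theorem tokenize_code_spec : Claim_equal_tokenize_code := by
  intro s _
  show tokenize_code s = tokenize_code_alt s
  rw [tokenize_code, tokenize_code_alt, foldA_eq, tcDelims,
    foldB_eq s.toList s.toList 0 [] 0 rfl (by omega)]
  simp
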